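-- pv_equiv track=rewrite | github.com/lusineduryan/ACA_Python | Basics/Homeworks/Homework_6/Exercise_2_fast determinant.py | fast_deter
-- ===== SOURCE A (Python) =====
-- def fast_deter(arg):
--     res = 0
--     N1 = arg
--     for i in range(len(arg)):
--         if i > 0:
--             N1 = N1[1:]
--             N1.append(arg[i-1])
--         N2 = N1[::-1]
--         prod1, prod2 = 1, 1
--         for j in range(len(N1)):
--             prod1 *= N1[j][j]
--         for k in range(len(N2)):
--             prod2 *= N2[k][k]
--         temp_res = prod1 - prod2
--         res += temp_res
--     return res
-- ===== SOURCE B (Python) =====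
-- def fast_deter(arg):
--     n = len(arg)
--     res = 0
--     for i in range(n):
--         prod1, prod2 = 1, 1
--         for j in range(n):
--             prod1 *= arg[(i + j) % n][j]
--             prod2 *= arg[(i + n - 1 - j) % n][j]
--         res += prod1 - prod2
--     return res
-- ===== Notes on version B (the rewrite author's own statement) =====
-- stated objective: simpler
-- what changed: Replaces the mutated rotating list N1 and its reversal N2 by direct modular indexing arg[(i+j)%n][j] / arg[(i+n-1-j)%n][j] into the original matrix, fusing the two inner product loops into one and allocating no intermediate lists.
import Mathlib
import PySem

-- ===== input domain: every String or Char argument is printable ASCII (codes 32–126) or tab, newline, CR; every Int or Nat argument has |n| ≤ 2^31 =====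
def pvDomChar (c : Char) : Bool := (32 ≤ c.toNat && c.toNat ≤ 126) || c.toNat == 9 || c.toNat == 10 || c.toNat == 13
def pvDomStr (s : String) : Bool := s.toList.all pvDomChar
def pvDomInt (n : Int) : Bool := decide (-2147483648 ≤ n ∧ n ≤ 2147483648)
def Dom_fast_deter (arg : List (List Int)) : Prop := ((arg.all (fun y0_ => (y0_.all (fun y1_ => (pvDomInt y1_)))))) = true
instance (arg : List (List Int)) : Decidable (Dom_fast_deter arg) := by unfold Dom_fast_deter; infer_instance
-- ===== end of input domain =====

-- B drops A's rotating-list construction and reversal, using modular indexing into the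
-- original matrix with one fused inner loop (objective: simpler; equal cost).

-- ===== PORT A =====
def fast_deter (arg : List (List Int)) : Int :=
  ((PySem.List.pyRange 0 (arg.length : Int) 1).foldl
    (fun (s : Int × List (List Int)) i =>
      let N1 := if (0 : Int) < i then
          PySem.List.slice s.2 (some 1) none ++ [(PySem.List.pyGet? arg (i - 1)).getD []]
        else s.2
      let N2 := (PySem.List.slice? N1 none none (-1)).getD []
      let prod1 := (PySem.List.pyRange 0 (N1.length : Int) 1).foldl
        (fun p j => p * ((PySem.List.pyGet? ((PySem.List.pyGet? N1 j).getD []) j).getD 0)) 1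
      let prod2 := (PySem.List.pyRange 0 (N2.length : Int) 1).foldl
        (fun p k => p * ((PySem.List.pyGet? ((PySem.List.pyGet? N2 k).getD []) k).getD 0)) 1
      (s.1 + (prod1 - prod2), N1))
    (0, arg)).1

-- ===== PORT B =====
def fast_deter_alt (arg : List (List Int)) : Int :=
  let n : Int := arg.length
  (PySem.List.pyRange 0 n 1).foldl
    (fun res i =>
      let pp := (PySem.List.pyRange 0 n 1).foldl
        (fun (p : Int × Int) j =>
          (p.1 * ((PySem.List.pyGet? ((PySem.List.pyGet? arg (PySem.Int.mod (i + j) n)).getD []) j).getD 0),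
           p.2 * ((PySem.List.pyGet? ((PySem.List.pyGet? arg (PySem.Int.mod (i + n - 1 - j) n)).getD []) j).getD 0)))
        (1, 1)
      res + (pp.1 - pp.2))
    0

-- ===== PRECONDITION & SPEC =====
-- Pre_ excludes exactly the inputs where Python A raises IndexError: some row shorter than
-- the number of rows (the diagonal lookups N1[j][j] then go out of range).
def Pre_fast_deter (arg : List (List Int)) : Prop := ∀ row ∈ arg, arg.length ≤ row.length
instance (arg : List (List Int)) : Decidable (Pre_fast_deter arg) := by unfold Pre_fast_deter; infer_instance
def pvWitness_fast_deter : List (List Int) := [[1, 2], [3, 4]]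

def Spec_fast_deter (arg : List (List Int)) (out : Int) : Prop := out = fast_deter_alt arg
instance (arg : List (List Int)) (out : Int) : Decidable (Spec_fast_deter arg out) := by unfold Spec_fast_deter; infer_instance

-- ===== CLAIM (what is proved, stated in full; the proofs are below) =====
def Claim_equal_fast_deter : Prop := ∀ (arg : List (List Int)), Dom_fast_deter arg → Pre_fast_deter arg → Spec_fast_deter arg (fast_deter arg)

-- ===== LEMMAS AND PROOFS =====

-- Proof-side names for the two loop bodies (definitionally the ports' lambdas).
def pvBodyA (arg : List (List Int)) (s : Int × List (List Int)) (i : Int) : Int × List (List Int) :=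
  let N1 := if (0 : Int) < i then
      PySem.List.slice s.2 (some 1) none ++ [(PySem.List.pyGet? arg (i - 1)).getD []]
    else s.2
  let N2 := (PySem.List.slice? N1 none none (-1)).getD []
  let prod1 := (PySem.List.pyRange 0 (N1.length : Int) 1).foldl
    (fun p j => p * ((PySem.List.pyGet? ((PySem.List.pyGet? N1 j).getD []) j).getD 0)) 1
  let prod2 := (PySem.List.pyRange 0 (N2.length : Int) 1).foldl
    (fun p k => p * ((PySem.List.pyGet? ((PySem.List.pyGet? N2 k).getD []) k).getD 0)) 1
  (s.1 + (prod1 - prod2), N1)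

def pvF (arg : List (List Int)) (i : Int) : Int :=
  let n : Int := arg.length
  let pp := (PySem.List.pyRange 0 n 1).foldl
    (fun (p : Int × Int) j =>
      (p.1 * ((PySem.List.pyGet? ((PySem.List.pyGet? arg (PySem.Int.mod (i + j) n)).getD []) j).getD 0),
       p.2 * ((PySem.List.pyGet? ((PySem.List.pyGet? arg (PySem.Int.mod (i + n - 1 - j) n)).getD []) j).getD 0)))
    (1, 1)
  pp.1 - pp.2

theorem fast_deter_eq_fold (arg : List (List Int)) :
    fast_deter arg = ((PySem.List.pyRange 0 (arg.length : Int) 1).foldl (pvBodyA arg) (0, arg)).1 := rfl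

theorem fast_deter_alt_eq_fold (arg : List (List Int)) :
    fast_deter_alt arg = (PySem.List.pyRange 0 (arg.length : Int) 1).foldl (fun r i => r + pvF arg i) 0 := rfl

-- rotation lookup: (drop i ++ take i)[j] is arg[(i+j) % n]
theorem pvRotGet (arg : List (List Int)) (i j : Nat) (hi : i ≤ arg.length) (hj : j < arg.length) :
    (arg.drop i ++ arg.take i)[j]? = arg[(i + j) % arg.length]? := by
  have hlen : (arg.drop i).length = arg.length - i := by simp
  rw [List.getElem?_append, hlen]
  by_cases h : j < arg.length - i
  · rw [if_pos h, List.getElem?_drop]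
    have hm : (i + j) % arg.length = i + j := Nat.mod_eq_of_lt (by omega)
    rw [hm]
  · rw [if_neg h]
    have hlt : j - (arg.length - i) < i := by omega
    rw [List.getElem?_take_of_lt hlt]
    have hm : (i + j) % arg.length = j - (arg.length - i) := by
      have h2 : i + j = (j - (arg.length - i)) + arg.length := by omega
      rw [h2, Nat.add_mod_right]
      exact Nat.mod_eq_of_lt (by omega)
    rw [hm]

-- the diagonal product of a cyclically-shifted matrix, restated with modular indexing
theorem pvProd1 (arg M : List (List Int)) (i : Nat)
    (hlen : M.length = arg.length)
    (hget : ∀ j : Nat, j < arg.length → M[j]? = arg[(i + j) % arg.length]?) :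
    (PySem.List.pyRange 0 (M.length : Int) 1).foldl
      (fun p j => p * ((PySem.List.pyGet? ((PySem.List.pyGet? M j).getD []) j).getD 0)) 1
    = (PySem.List.pyRange 0 (arg.length : Int) 1).foldl
      (fun p j => p * ((PySem.List.pyGet? ((PySem.List.pyGet? arg (PySem.Int.mod ((i : Int) + j) (arg.length : Int))).getD []) j).getD 0)) 1 := by
  rw [hlen]
  apply PySem.List.foldl_congr_mem
  intro acc x hx
  rw [PySem.List.mem_pyRange_one] at hx
  obtain ⟨h0, hlt⟩ := hx
  obtain ⟨jn, rfl⟩ := Int.eq_ofNat_of_zero_le h0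
  have hj : jn < arg.length := by exact_mod_cast hlt
  have hc : ((i : Int) + (jn : Int)) = ((i + jn : Nat) : Int) := by omega
  rw [hc, PySem.Int.mod_natCast]
  simp only [PySem.List.pyGet?_natCast]
  rw [hget jn hj]

theorem pvProd2 (arg M : List (List Int)) (i : Nat)
    (hlen : M.length = arg.length)
    (hget : ∀ j : Nat, j < arg.length → M[j]? = arg[(i + j) % arg.length]?) :
    (PySem.List.pyRange 0 (M.reverse.length : Int) 1).foldl
      (fun p k => p * ((PySem.List.pyGet? ((PySem.List.pyGet? M.reverse k).getD []) k).getD 0)) 1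
    = (PySem.List.pyRange 0 (arg.length : Int) 1).foldl
      (fun p j => p * ((PySem.List.pyGet? ((PySem.List.pyGet? arg (PySem.Int.mod ((i : Int) + (arg.length : Int) - 1 - j) (arg.length : Int))).getD []) j).getD 0)) 1 := by
  have hn : M.reverse.length = arg.length := by simp [hlen]
  rw [hn]
  apply PySem.List.foldl_congr_mem
  intro acc x hx
  rw [PySem.List.mem_pyRange_one] at hx
  obtain ⟨h0, hlt⟩ := hx
  obtain ⟨kn, rfl⟩ := Int.eq_ofNat_of_zero_le h0
  have hk : kn < arg.length := by exact_mod_cast hlt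
  have hrev : M.reverse[kn]? = M[arg.length - 1 - kn]? := by
    rw [List.getElem?_reverse (by omega : kn < M.length), hlen]
  have hc : ((i : Int) + (arg.length : Int) - 1 - (kn : Int))
      = ((i + (arg.length - 1 - kn) : Nat) : Int) := by omega
  rw [hc, PySem.Int.mod_natCast]
  simp only [PySem.List.pyGet?_natCast]
  rw [hrev, hget (arg.length - 1 - kn) (by omega)]

-- one rotation step of A's maintained list
theorem pvRotStep (arg : List (List Int)) (i : Nat) (h1 : 1 ≤ i) (h2 : i ≤ arg.length) :
    PySem.List.slice (arg.drop (i - 1) ++ arg.take (i - 1)) (some 1) none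
      ++ [(PySem.List.pyGet? arg ((i : Int) - 1)).getD []]
    = arg.drop i ++ arg.take i := by
  have hi' : i - 1 < arg.length := by omega
  rw [PySem.List.slice_from_one]
  have hd : arg.drop (i - 1) = arg[i - 1] :: arg.drop i := by
    have h2 : i - 1 + 1 = i := by omega
    rw [List.drop_eq_getElem_cons hi', h2]
  have hg : (PySem.List.pyGet? arg ((i : Int) - 1)).getD [] = arg[i - 1] := by
    have hc : ((i : Int) - 1) = ((i - 1 : Nat) : Int) := by omega
    rw [hc, PySem.List.pyGet?_natCast, List.getElem?_eq_getElem hi']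
    rfl
  have ht : arg.take i = arg.take (i - 1) ++ [arg[i - 1]] := by
    have h2 : i = (i - 1) + 1 := by omega
    conv_lhs => rw [h2]
    rw [List.take_add_one, List.getElem?_eq_getElem hi']
    rfl
  rw [hg, hd, List.cons_append, List.tail_cons, List.append_assoc, ← ht]

theorem pvStepA (arg : List (List Int)) (i : Nat) (h1 : 1 ≤ i) (hi : i < arg.length) (res : Int) :
    pvBodyA arg (res, arg.drop (i - 1) ++ arg.take (i - 1)) (i : Int)
    = (res + pvF arg (i : Int), arg.drop i ++ arg.take i) := by
  have hipos : (0 : Int) < (i : Int) := by exact_mod_cast h1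
  have hget : ∀ j : Nat, j < arg.length →
      (arg.drop i ++ arg.take i)[j]? = arg[(i + j) % arg.length]? :=
    fun j hj => pvRotGet arg i j (by omega) hj
  simp only [pvBodyA, pvF, if_pos hipos,
    pvRotStep arg i h1 (by omega), PySem.List.slice?_none_none_neg_one, Option.getD_some]
  rw [PySem.List.foldl_prod_mk
    (f := fun p j => p * ((PySem.List.pyGet? ((PySem.List.pyGet? arg (PySem.Int.mod ((i : Int) + j) (arg.length : Int))).getD []) j).getD 0))
    (g := fun p j => p * ((PySem.List.pyGet? ((PySem.List.pyGet? arg (PySem.Int.mod ((i : Int) + (arg.length : Int) - 1 - j) (arg.length : Int))).getD []) j).getD 0))]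
  rw [pvProd1 arg _ i (by simp; omega) hget, pvProd2 arg _ i (by simp; omega) hget]

theorem pvStep0 (arg : List (List Int)) (_h : 0 < arg.length) :
    pvBodyA arg (0, arg) 0 = (0 + pvF arg 0, arg) := by
  have hget : ∀ j : Nat, j < arg.length → arg[j]? = arg[(0 + j) % arg.length]? := by
    intro j hj
    rw [Nat.zero_add, Nat.mod_eq_of_lt hj]
  simp only [pvBodyA, pvF, if_neg (by omega : ¬ (0 : Int) < 0),
    PySem.List.slice?_none_none_neg_one, Option.getD_some]
  rw [PySem.List.foldl_prod_mk
    (f := fun p j => p * ((PySem.List.pyGet? ((PySem.List.pyGet? arg (PySem.Int.mod ((0 : Int) + j) (arg.length : Int))).getD []) j).getD 0))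
    (g := fun p j => p * ((PySem.List.pyGet? ((PySem.List.pyGet? arg (PySem.Int.mod ((0 : Int) + (arg.length : Int) - 1 - j) (arg.length : Int))).getD []) j).getD 0))]
  have h1 := pvProd1 arg arg 0 rfl hget
  have h2 := pvProd2 arg arg 0 rfl hget
  simp only [Nat.cast_zero] at h1 h2
  rw [h1, h2]

theorem pvLoopA (arg : List (List Int)) :
    ∀ (k i : Nat) (res : Int), i + k = arg.length → 1 ≤ i →
    ((PySem.List.pyRange (i : Int) (arg.length : Int) 1).foldl (pvBodyA arg)
        (res, arg.drop (i - 1) ++ arg.take (i - 1))).1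
    = (PySem.List.pyRange (i : Int) (arg.length : Int) 1).foldl (fun r x => r + pvF arg x) res := by
  intro k
  induction k with
  | zero =>
    intro i res hik h1
    rw [PySem.List.pyRange_one_eq_nil (by omega : (arg.length : Int) ≤ (i : Int))]
    simp
  | succ k ih =>
    intro i res hik h1
    have hlt : (i : Int) < (arg.length : Int) := by omega
    rw [PySem.List.pyRange_one_cons hlt]
    simp only [List.foldl_cons]
    rw [pvStepA arg i h1 (by omega) res]
    have hc : (i : Int) + 1 = ((i + 1 : Nat) : Int) := by omega
    rw [hc]
    have := ih (i + 1) (res + pvF arg (i : Int)) (by omega) (by omega)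
    simpa using this

theorem pvMain (arg : List (List Int)) : fast_deter arg = fast_deter_alt arg := by
  rw [fast_deter_eq_fold, fast_deter_alt_eq_fold]
  rcases Nat.eq_zero_or_pos arg.length with h | h
  · rw [h]
    rw [PySem.List.pyRange_one_eq_nil (by omega)]
    rfl
  · have h0 : (0 : Int) < (arg.length : Int) := by exact_mod_cast h
    rw [PySem.List.pyRange_one_cons h0]
    simp only [List.foldl_cons]
    rw [pvStep0 arg h]
    have := pvLoopA arg (arg.length - 1) 1 (0 + pvF arg 0) (by omega) (by omega)
    simpa using this

-- ===== VERDICT (by name: the statement is the Claim_ definition above) =====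
theorem fast_deter_spec : Claim_equal_fast_deter := by
  intro arg _ _
  unfold Spec_fast_deter
  exact pvMain arg
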